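-- pv_equiv track=rewrite | github.com/Jason-AM/arxiv-updates | app/article_ordering.py | sort_articles_by_key_words
-- ===== SOURCE A (Python) =====
-- from itertools import combinations, filterfalse, tee
--
-- def partition(pred, iterable):
--     "Use a predicate to partition entries into false entries and true entries"
--     # partition(is_odd, range(10)) --> 0 2 4 6 8   and  1 3 5 7 9
--     t1, t2 = tee(iterable)
--     return list(filterfalse(pred, t1)), list(filter(pred, t2))
--
-- def get_word_combinations(list_of_words):
--     """
--     Gets a list of all possible combinations of search words for instance if:
--     [deep, bayesian] -> [['bayesian', 'deep'], ['baysian'], ['deep']]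
--     Notice that it should be in alphabetical order and largest list first
--     """
--     word_combos = []
--     for L in range(len(list_of_words) + 1, 0, -1):
--         for subset in combinations(list_of_words, L):
--             word_combos.append(sorted(subset))
--     return word_combos
--
-- def sort_articles_by_key_words(list_of_titles_urls, list_of_key_words):
--     list_of_key_words = [w.strip() for w in list_of_key_words]
--
--     titles_to_bottom = list_of_titles_urls
--     titles_to_top = []
--
--     search_word_combinations = get_word_combinations(list_of_key_words)
--
--     for words in search_word_combinations:
--
--         def are_search_words_in_title(x):
--             return all(word.lower() in x[0].lower() for word in words)
--
--         titles_to_bottom, titles_to_top_p = partition(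
--             are_search_words_in_title, titles_to_bottom
--         )
--
--         titles_to_top.extend(titles_to_top_p)
--
--     return titles_to_top + titles_to_bottom
-- ===== SOURCE B (Python) =====
-- from itertools import combinations
--
--
-- def sort_articles_by_key_words(list_of_titles_urls, list_of_key_words):
--     # One pass over the titles: each title is assigned the index of the first
--     # keyword-combination it matches (combinations ordered largest-first, as in
--     # the original), then the buckets are concatenated in combination order.
--     key_words = [w.strip().lower() for w in list_of_key_words]
--     combos = [
--         c
--         for size in range(len(key_words), 0, -1)
--         for c in combinations(key_words, size)
--     ]
--     buckets = [[] for _ in range(len(combos) + 1)]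
--     for title_url in list_of_titles_urls:
--         title = title_url[0].lower()
--         k = next(
--             (i for i, c in enumerate(combos) if all(w in title for w in c)),
--             len(combos),
--         )
--         buckets[k].append(title_url)
--     return [title_url for bucket in buckets for title_url in bucket]
-- ===== Notes on version B (the rewrite author's own statement) =====
-- stated objective: faster
-- what changed: Instead of re-partitioning the shrinking title list once per keyword combination (combination-major, lowercasing every title again on every pass), B makes a single pass over the titles, assigns each title the index of the first combination it matches (title lowercased once, combination scan stops at the first hit) and concatenates the per-combination buckets.
import Mathlib
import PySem

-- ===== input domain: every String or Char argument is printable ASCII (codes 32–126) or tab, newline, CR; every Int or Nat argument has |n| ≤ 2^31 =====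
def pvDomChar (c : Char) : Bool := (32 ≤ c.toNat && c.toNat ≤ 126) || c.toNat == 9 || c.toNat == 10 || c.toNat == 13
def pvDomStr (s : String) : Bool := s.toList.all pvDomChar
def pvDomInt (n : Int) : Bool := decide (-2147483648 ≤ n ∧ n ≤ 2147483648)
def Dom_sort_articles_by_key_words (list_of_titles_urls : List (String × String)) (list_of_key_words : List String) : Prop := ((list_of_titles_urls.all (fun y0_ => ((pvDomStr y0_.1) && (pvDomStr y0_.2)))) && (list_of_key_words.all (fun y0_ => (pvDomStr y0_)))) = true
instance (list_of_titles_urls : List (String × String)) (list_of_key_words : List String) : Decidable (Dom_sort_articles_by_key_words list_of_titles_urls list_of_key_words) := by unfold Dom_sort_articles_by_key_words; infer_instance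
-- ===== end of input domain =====

-- B replaces A's repeated partitioning of the remaining titles (one pass per keyword
-- combination) by a single pass over the titles that buckets each title under the index of
-- the first combination it matches; objective: alternative traversal (title-major instead of
-- combination-major, each title lowercased once).

-- ===== PORT A =====
-- partition(pred, iterable) = (list(filterfalse(pred, …)), list(filter(pred, …)))
def pvPartitionA {α : Type} (pred : α → Bool) (l : List α) : List α × List α :=
  (l.filter (fun x => !pred x), l.filter pred)

def get_word_combinations (list_of_words : List String) : List (List String) :=
  (PySem.List.pyRange ((list_of_words.length : Int) + 1) 0 (-1)).foldl
    (fun word_combos L =>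
      (PySem.List.combinations list_of_words L.toNat).foldl
        (fun word_combos subset => word_combos ++ [PySem.List.sorted subset (fun w => w) false])
        word_combos)
    []

def sort_articles_by_key_words (list_of_titles_urls : List (String × String)) (list_of_key_words : List String) : List (String × String) :=
  let list_of_key_words := list_of_key_words.map (fun w => PySem.Str.strip w)
  let search_word_combinations := get_word_combinations list_of_key_words
  let st := search_word_combinations.foldl
    (fun (st : List (String × String) × List (String × String)) words =>
      let p := pvPartitionA
        (fun x => words.all (fun word => PySem.Str.isIn (PySem.Str.lower word) (PySem.Str.lower x.1)))
        st.1
      (p.1, st.2 ++ p.2))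
    (list_of_titles_urls, [])
  st.2 ++ st.1

-- ===== PORT B =====
def sort_articles_by_key_words_alt (list_of_titles_urls : List (String × String)) (list_of_key_words : List String) : List (String × String) :=
  let key_words := list_of_key_words.map (fun w => PySem.Str.lower (PySem.Str.strip w))
  let combos := (PySem.List.pyRange (key_words.length : Int) 0 (-1)).flatMap
    (fun size => PySem.List.combinations key_words size.toNat)
  let buckets := list_of_titles_urls.foldl
    (fun (buckets : List (List (String × String))) title_url =>
      let title := PySem.Str.lower title_url.1
      -- next((i for i, c in enumerate(combos) if all(w in title for w in c)), len(combos))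
      -- = index of the first matching combo, combos.length if none (hand-port, exact)
      let k := combos.findIdx (fun c => c.all (fun w => PySem.Str.isIn w title))
      buckets.modify k (fun b => b ++ [title_url]))
    (List.replicate (combos.length + 1) [])
  buckets.flatten

-- ===== PRECONDITION & SPEC =====
def Spec_sort_articles_by_key_words (list_of_titles_urls : List (String × String)) (list_of_key_words : List String) (out : List (String × String)) : Prop := out = sort_articles_by_key_words_alt list_of_titles_urls list_of_key_words
instance (list_of_titles_urls : List (String × String)) (list_of_key_words : List String) (out : List (String × String)) : Decidable (Spec_sort_articles_by_key_words list_of_titles_urls list_of_key_words out) := by unfold Spec_sort_articles_by_key_words; infer_instance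

-- ===== CLAIM (what is proved, stated in full; the proofs are below) =====
def Claim_equal_sort_articles_by_key_words : Prop := ∀ (list_of_titles_urls : List (String × String)) (list_of_key_words : List String), Dom_sort_articles_by_key_words list_of_titles_urls list_of_key_words → Spec_sort_articles_by_key_words list_of_titles_urls list_of_key_words (sort_articles_by_key_words list_of_titles_urls list_of_key_words)

-- ===== LEMMAS AND PROOFS =====

-- The per-combination match predicate both programs use, over the stripped keywords.
def pvPred (c : List String) : (String × String) → Bool :=
  fun x => c.all (fun w => PySem.Str.isIn (PySem.Str.lower w) (PySem.Str.lower x.1))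

-- The shared sequence of keyword subsets (largest size first, index-lexicographic inside a size).
def pvCseq (ws : List String) : List (List String) :=
  (PySem.List.pyRange ((ws.length : Int)) 0 (-1)).flatMap
    (fun L => PySem.List.combinations ws L.toNat)

-- A's cascade of partitions, abstracted over the list of per-combination predicates.
def pvChain {α : Type} : List (α → Bool) → List α → List α
  | [], ts => ts
  | p :: ps, ts => ts.filter p ++ pvChain ps (ts.filter (fun x => !p x))

-- A's fold over the combinations computes pvChain.
theorem pvA_foldl_eq_chain {α β : Type} (pred : β → α → Bool) (cs : List β) (ts acc : List α) :
    (cs.foldl (fun (st : List α × List α) c =>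
        ((pvPartitionA (pred c) st.1).1, st.2 ++ (pvPartitionA (pred c) st.1).2)) (ts, acc)).2
      ++ (cs.foldl (fun (st : List α × List α) c =>
        ((pvPartitionA (pred c) st.1).1, st.2 ++ (pvPartitionA (pred c) st.1).2)) (ts, acc)).1
      = acc ++ pvChain (cs.map (fun c => pred c)) ts := by
  induction cs generalizing ts acc with
  | nil => simp [pvChain]
  | cons c cs ih =>
    simp only [List.foldl_cons, List.map_cons, pvChain]
    rw [ih]
    simp [pvPartitionA]

theorem pv_mapIdx_id {α : Type} (bs : List α) : bs.mapIdx (fun _ b => b) = bs := by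
  apply List.ext_getElem <;> simp

-- B's bucket-filling fold, pointwise: bucket i collects the items whose index is i.
theorem pvB_foldl_buckets {α : Type} (idx : α → Nat) (ts : List α) (bs0 : List (List α)) :
    ts.foldl (fun bs x => bs.modify (idx x) (fun b => b ++ [x])) bs0
      = bs0.mapIdx (fun i b => b ++ ts.filter (fun x => idx x == i)) := by
  induction ts generalizing bs0 with
  | nil => simp [pv_mapIdx_id]
  | cons x ts ih =>
    simp only [List.foldl_cons, ih]
    apply List.ext_getElem
    · simp
    · intro i h1 h2
      simp only [List.getElem_mapIdx, List.getElem_modify, List.filter_cons]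
      by_cases hx : idx x = i
      · simp [hx]
      · simp [hx, beq_iff_eq]

-- flatten of the first-match buckets is the partition cascade.
theorem pvB_buckets_eq_chain {α β : Type} (pred : β → α → Bool) (cs : List β) (ts : List α) :
    ((List.replicate (cs.length + 1) ([] : List α)).mapIdx
        (fun i b => b ++ ts.filter (fun x => cs.findIdx (fun c => pred c x) == i))).flatten
      = pvChain (cs.map (fun c => pred c)) ts := by
  induction cs generalizing ts with
  | nil => simp [pvChain, List.findIdx_nil]
  | cons c cs ih =>
    have hrep : List.replicate (cs.length + 1 + 1) ([] : List α)
        = [] :: List.replicate (cs.length + 1) ([] : List α) := rfl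
    simp only [List.length_cons, hrep, List.mapIdx_cons, List.flatten_cons, List.map_cons, pvChain]
    rw [← ih (ts.filter (fun x => !pred c x))]
    congr 1
    · simp only [List.nil_append]
      apply List.filter_congr
      intro x _
      by_cases hp : pred c x <;> simp [List.findIdx_cons, hp]
    · congr 1
      rw [List.mapIdx_eq_zipIdx_map, List.mapIdx_eq_zipIdx_map]
      apply List.map_congr_left
      intro bi hmem
      simp only []
      congr 1
      rw [List.filter_filter]
      apply List.filter_congr
      intro x _
      by_cases hp : pred c x <;> simp [List.findIdx_cons, hp]

-- all over a sorted list = all over the list (membership only); stated as a simp-usable equation.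
theorem pv_all_sorted (c : List String) (p : String → Bool) :
    (PySem.List.sorted c (fun w => w) false).all p = c.all p := by
  have h := PySem.List.sorted_perm c (fun w => w) false
  rw [Bool.eq_iff_iff]
  simp only [List.all_eq_true]
  exact ⟨fun hall x hx => hall x (h.mem_iff.mpr hx),
    fun hall x hx => hall x (h.mem_iff.mp hx)⟩

-- get_word_combinations is the shared subset sequence, each subset sorted.
theorem pv_gwc_eq (ws : List String) :
    get_word_combinations ws
      = (pvCseq ws).map (fun c => PySem.List.sorted c (fun w => w) false) := by
  unfold get_word_combinations pvCseq
  simp only [PySem.List.foldl_append_singleton_eq_map]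
  rw [PySem.List.foldl_append_eq_flatMap, ← List.map_flatMap]
  rw [PySem.List.pyRange_neg_one_cons (by positivity)]
  have h1 : ((ws.length : Int) + 1).toNat = ws.length + 1 := by omega
  have h2 : ((ws.length : Int) + 1 - 1) = (ws.length : Int) := by omega
  rw [List.flatMap_cons, h1, h2,
    show PySem.List.combinations ws (ws.length + 1) = [] from
      PySem.List.combinations_eq_nil_of_length_lt ws (by omega)]
  simp

-- A computes pvChain of the shared predicates.
theorem pvA_eq (ts : List (String × String)) (kws : List String) :
    sort_articles_by_key_words ts kws
      = pvChain ((pvCseq (kws.map (fun w => PySem.Str.strip w))).map pvPred) ts := by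
  simp only [sort_articles_by_key_words, pv_gwc_eq, List.foldl_map, pv_all_sorted]
  exact pvA_foldl_eq_chain
    (fun (c : List String) (x : String × String) =>
      c.all (fun word => PySem.Str.isIn (PySem.Str.lower word) (PySem.Str.lower x.1)))
    _ ts []

-- B computes pvChain of the same predicates.
theorem pvB_eq (ts : List (String × String)) (kws : List String) :
    sort_articles_by_key_words_alt ts kws
      = pvChain ((pvCseq (kws.map (fun w => PySem.Str.strip w))).map pvPred) ts := by
  simp only [sort_articles_by_key_words_alt]
  have hkw : kws.map (fun w => PySem.Str.lower (PySem.Str.strip w))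
      = (kws.map (fun w => PySem.Str.strip w)).map PySem.Str.lower := by
    rw [List.map_map]; rfl
  have hcombos :
      (PySem.List.pyRange (((kws.map (fun w => PySem.Str.lower (PySem.Str.strip w))).length : Int)) 0 (-1)).flatMap
          (fun L => PySem.List.combinations (kws.map (fun w => PySem.Str.lower (PySem.Str.strip w))) L.toNat)
        = (pvCseq (kws.map (fun w => PySem.Str.strip w))).map (List.map PySem.Str.lower) := by
    unfold pvCseq
    rw [hkw, List.map_flatMap]
    simp only [List.length_map, PySem.List.combinations_map]
  rw [hcombos]
  rw [pvB_foldl_buckets]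
  refine Eq.trans
    (pvB_buckets_eq_chain
      (fun (c : List String) (x : String × String) =>
        c.all (fun w => PySem.Str.isIn w (PySem.Str.lower x.1)))
      (List.map (List.map PySem.Str.lower) (pvCseq (kws.map (fun w => PySem.Str.strip w)))) ts)
    ?_
  congr 1
  rw [List.map_map]
  apply List.map_congr_left
  intro c _
  funext x
  simp [pvPred, List.all_map, Function.comp_def, pysem]

-- ===== VERDICT (by name: the statement is the Claim_ definition above) =====
theorem sort_articles_by_key_words_spec : Claim_equal_sort_articles_by_key_words := by
  intro ts kws _
  unfold Spec_sort_articles_by_key_words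
  rw [pvA_eq, pvB_eq]
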